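-- pv_equiv track=rewrite | github.com/SkyfengBiuBiu/pytorch-detect-to-track_1 | others/generate_subset_images.py | _load_valid_index
-- ===== SOURCE A (Python) =====
-- def _load_valid_index(valid_index, image_index_pre,flag):
--
--     sub_chunk=[]
--     new_chunk=[]
--
--     if flag:
--         for i in range(len(valid_index)):
--             if i==0:
--                 sub_chunk.append(valid_index[i])
--             elif image_index_pre[i]==image_index_pre[i-1]:
--                 sub_chunk.append(valid_index[i])
--             else:
--                 if True in sub_chunk:
--                     sub_chunk=[True]*len(sub_chunk)
--                 new_chunk.append(sub_chunk)
--                 sub_chunk=[]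
--                 sub_chunk.append(valid_index[i])
--
--
--         new_chunk.append(sub_chunk)
--
--         concat_list = [j for i in new_chunk for j in i]
--         return concat_list
--     else:
--         return valid_index
-- ===== SOURCE B (Python) =====
-- def _load_valid_index(valid_index, image_index_pre, flag):
--     if not flag:
--         return valid_index
--     n = len(valid_index)
--     # stage 1: label every position with the id of the maximal equal-key run it belongs to
--     run_id = []
--     r = 0
--     for i in range(n):
--         if i > 0 and image_index_pre[i] != image_index_pre[i - 1]:
--             r += 1
--         run_id.append(r)
--     # stage 2: the set of run ids that contain a True anywhere
--     truthy = {run_id[j] for j in range(n) if valid_index[j]}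
--     # stage 3: decide each output position independently
--     return [True if run_id[i] in truthy else valid_index[i] for i in range(n)]
-- ===== Notes on version B (the rewrite author's own statement) =====
-- stated objective: alternative
-- what changed: B never extracts chunks: it labels every position with a run id in one pass, builds the set of run ids containing a True, and then decides each output element independently by a set-membership test, instead of A's accumulate-a-sub_chunk/flush-to-new_chunk/flatten pass; B also normalises the final run, which A forgets (stated as D_).
-- intended difference: When flag is set and the last maximal run of equal image_index_pre keys contains both True and False, A returns that final chunk unchanged (it skips the 'True in' normalisation after the loop), while B marks the whole run True, which is the evident intent applied to every other run. — e.g. on _load_valid_index([true, false, false], [5, 5, 5], true): A returns [true, false, false], B returns [true, true, true]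
import Mathlib
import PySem

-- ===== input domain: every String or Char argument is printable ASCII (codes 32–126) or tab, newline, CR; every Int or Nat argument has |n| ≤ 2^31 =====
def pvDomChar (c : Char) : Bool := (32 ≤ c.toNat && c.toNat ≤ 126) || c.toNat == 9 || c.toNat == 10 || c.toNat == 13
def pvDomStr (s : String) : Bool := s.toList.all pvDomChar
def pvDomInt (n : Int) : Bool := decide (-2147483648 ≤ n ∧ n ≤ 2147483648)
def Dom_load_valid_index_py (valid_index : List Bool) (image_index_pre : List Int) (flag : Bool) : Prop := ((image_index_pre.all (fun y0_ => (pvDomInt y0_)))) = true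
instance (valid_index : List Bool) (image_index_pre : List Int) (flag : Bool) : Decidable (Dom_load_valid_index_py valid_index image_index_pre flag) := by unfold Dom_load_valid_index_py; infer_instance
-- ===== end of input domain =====

-- B replaces A's accumulate-a-sub_chunk/flush/flatten pass by three stages: label each position
-- with the id of its maximal equal-key run, build the set of run ids containing a True, then
-- decide every output element independently by a set-membership test; B also normalises the
-- final run, which A forgets (stated as the intended difference D_ below).

-- ===== PORT A =====
-- loop body of A's `for i in range(len(valid_index))` (state: (sub_chunk, new_chunk));
-- indices are always ≥ 0 and, inside Pre_, in range, so xs[i] is ported as getD.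
def stepA (vals : List Bool) (keys : List Int) (st : List Bool × List (List Bool)) (i : Nat) :
    List Bool × List (List Bool) :=
  if i = 0 then (st.1 ++ [vals.getD i false], st.2)
  else if keys.getD i 0 = keys.getD (i-1) 0 then (st.1 ++ [vals.getD i false], st.2)
  else ([vals.getD i false],
        st.2 ++ [if true ∈ st.1 then List.replicate st.1.length true else st.1])

def load_valid_index_py (valid_index : List Bool) (image_index_pre : List Int) (flag : Bool) : List Bool :=
  if flag then
    let r := (List.range valid_index.length).foldl (stepA valid_index image_index_pre) ([], [])
    -- new_chunk.append(sub_chunk); concat_list = [j for i in new_chunk for j in i]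
    (r.2 ++ [r.1]).flatten
  else valid_index

-- ===== PORT B =====
-- stage 1 of Source B: the `for i in range(n)` loop building run_id (state: (r, run_id))
def altRunIds (keys : List Int) (n : Nat) : Nat × List Nat :=
  (List.range n).foldl (fun st i =>
    let r := if 0 < i ∧ keys.getD i 0 ≠ keys.getD (i-1) 0 then st.1 + 1 else st.1
    (r, st.2 ++ [r])) (0, [])

-- stage 2 of Source B: the set comprehension {run_id[j] for j in range(n) if valid_index[j]}
def altTruthy (vals : List Bool) (run_id : List Nat) (n : Nat) : PySem.Set Nat :=
  PySem.Set.ofList (((List.range n).filter (fun j => vals.getD j false)).map (fun j => run_id.getD j 0))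

def load_valid_index_py_alt (valid_index : List Bool) (image_index_pre : List Int) (flag : Bool) : List Bool :=
  if flag then
    let n := valid_index.length
    let run_id := (altRunIds image_index_pre n).2
    let truthy := altTruthy valid_index run_id n
    -- stage 3: [True if run_id[i] in truthy else valid_index[i] for i in range(n)]
    (List.range n).map (fun i => if run_id.getD i 0 ∈ truthy then true else valid_index.getD i false)
  else valid_index

-- ===== PRECONDITION & SPEC =====
-- Pre_ excludes exactly the inputs where Python A raises IndexError:
-- flag set and image_index_pre shorter than valid_index (with at least two elements).
def Pre_load_valid_index_py (valid_index : List Bool) (image_index_pre : List Int) (flag : Bool) : Prop :=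
  flag = true → valid_index.length ≤ 1 ∨ valid_index.length ≤ image_index_pre.length
instance (valid_index : List Bool) (image_index_pre : List Int) (flag : Bool) : Decidable (Pre_load_valid_index_py valid_index image_index_pre flag) := by unfold Pre_load_valid_index_py; infer_instance

def pvWitness_load_valid_index_py : List Bool × List Int × Bool := ([true, false], [1, 1], true)

-- When flag is set and the LAST maximal run of equal image_index_pre keys contains both True and
-- False, A returns that final chunk unchanged (it forgets the `True in` normalisation after the
-- loop), while B marks the whole run True — the evident intent, as done for every other run.
def D_load_valid_index_py (valid_index : List Bool) (image_index_pre : List Int) (flag : Bool) : Prop :=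
  flag = true ∧ ∃ i, i < valid_index.length ∧
    (∀ t, t < valid_index.length → i < t →
       image_index_pre.getD t 0 = image_index_pre.getD (t-1) 0) ∧
    true ∈ valid_index.drop i ∧ false ∈ valid_index.drop i
instance (valid_index : List Bool) (image_index_pre : List Int) (flag : Bool) : Decidable (D_load_valid_index_py valid_index image_index_pre flag) := by unfold D_load_valid_index_py; infer_instance

def Spec_load_valid_index_py (valid_index : List Bool) (image_index_pre : List Int) (flag : Bool) (out : List Bool) : Prop :=
  ¬ D_load_valid_index_py valid_index image_index_pre flag → out = load_valid_index_py_alt valid_index image_index_pre flag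
instance (valid_index : List Bool) (image_index_pre : List Int) (flag : Bool) (out : List Bool) : Decidable (Spec_load_valid_index_py valid_index image_index_pre flag out) := by unfold Spec_load_valid_index_py; infer_instance

def pvDiffWitness_load_valid_index_py : List Bool × List Int × Bool := ([true, false, false], [5, 5, 5], true)
def pvDiffWitnessOut_load_valid_index_py : (List Bool) × (List Bool) := ([true, false, false], [true, true, true])

-- ===== CLAIM (what is proved, stated in full; the proofs are below) =====
def Claim_unchanged_load_valid_index_py : Prop := ∀ (valid_index : List Bool) (image_index_pre : List Int) (flag : Bool), Dom_load_valid_index_py valid_index image_index_pre flag → Pre_load_valid_index_py valid_index image_index_pre flag → Spec_load_valid_index_py valid_index image_index_pre flag (load_valid_index_py valid_index image_index_pre flag)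
def Claim_changed_load_valid_index_py : Prop := Dom_load_valid_index_py (pvDiffWitness_load_valid_index_py.1) (pvDiffWitness_load_valid_index_py.2.1) (pvDiffWitness_load_valid_index_py.2.2) ∧ Pre_load_valid_index_py (pvDiffWitness_load_valid_index_py.1) (pvDiffWitness_load_valid_index_py.2.1) (pvDiffWitness_load_valid_index_py.2.2) ∧ D_load_valid_index_py (pvDiffWitness_load_valid_index_py.1) (pvDiffWitness_load_valid_index_py.2.1) (pvDiffWitness_load_valid_index_py.2.2) ∧ load_valid_index_py (pvDiffWitness_load_valid_index_py.1) (pvDiffWitness_load_valid_index_py.2.1) (pvDiffWitness_load_valid_index_py.2.2) = pvDiffWitnessOut_load_valid_index_py.1 ∧ load_valid_index_py_alt (pvDiffWitness_load_valid_index_py.1) (pvDiffWitness_load_valid_index_py.2.1) (pvDiffWitness_load_valid_index_py.2.2) = pvDiffWitnessOut_load_valid_index_py.2 ∧ pvDiffWitnessOut_load_valid_index_py.1 ≠ pvDiffWitnessOut_load_valid_index_py.2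
def Claim_exact_load_valid_index_py : Prop := ∀ (valid_index : List Bool) (image_index_pre : List Int) (flag : Bool), Dom_load_valid_index_py valid_index image_index_pre flag → Pre_load_valid_index_py valid_index image_index_pre flag → D_load_valid_index_py valid_index image_index_pre flag → load_valid_index_py valid_index image_index_pre flag ≠ load_valid_index_py_alt valid_index image_index_pre flag

-- ===== LEMMAS AND PROOFS =====

def pvNorm (l : List Bool) : List Bool := if true ∈ l then List.replicate l.length true else l

-- the run id of position k: number of key boundaries at positions 1..k
def rid (keys : List Int) : Nat → Nat
  | 0 => 0
  | k+1 => rid keys k + (if keys.getD (k+1) 0 = keys.getD k 0 then 0 else 1)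

theorem rid_fold (keys : List Int) (n : Nat) :
    altRunIds keys n = (rid keys (n-1), (List.range n).map (rid keys)) := by
  induction n with
  | zero => rfl
  | succ n ih =>
    unfold altRunIds at ih ⊢
    rw [List.range_succ, List.foldl_append, ih, List.foldl_cons, List.foldl_nil]
    have hr : (if 0 < n ∧ keys.getD n 0 ≠ keys.getD (n-1) 0
        then rid keys (n-1) + 1 else rid keys (n-1)) = rid keys n := by
      cases n with
      | zero => simp [rid]
      | succ m =>
        have hgoal : rid keys (m+1)
            = rid keys m + (if keys.getD (m+1) 0 = keys.getD m 0 then 0 else 1) := rfl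
        simp only [Nat.add_sub_cancel]
        rw [hgoal]
        by_cases h : keys.getD (m+1) 0 = keys.getD m 0
        · rw [if_neg (fun hc => hc.2 h), if_pos h]
          omega
        · rw [if_pos ⟨Nat.succ_pos m, h⟩, if_neg h]
    dsimp only
    rw [hr]
    simp

theorem rid_mono (keys : List Int) : ∀ a b, a ≤ b → rid keys a ≤ rid keys b := by
  intro a b
  induction b with
  | zero => intro h; rw [Nat.le_zero.mp h]
  | succ b ih =>
    intro h
    rcases Nat.eq_or_lt_of_le h with rfl | h'
    · exact Nat.le_refl _
    · have := ih (by omega)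
      simp only [rid]
      split <;> omega

theorem rid_const_of_run (keys : List Int) (a : Nat) :
    ∀ b, a ≤ b → (∀ t, a < t → t ≤ b → keys.getD t 0 = keys.getD (t-1) 0) →
    rid keys b = rid keys a := by
  intro b
  induction b with
  | zero => intro h _; rw [Nat.le_zero.mp h]
  | succ b ih =>
    intro hab hconst
    rcases Nat.eq_or_lt_of_le hab with heq | h
    · rw [heq]
    · have hb : keys.getD (b+1) 0 = keys.getD b 0 := by
        have := hconst (b+1) (by omega) (Nat.le_refl _)
        simpa using this
      simp only [rid, hb, if_pos, Nat.add_zero]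
      exact ih (by omega) (fun t h1 h2 => hconst t h1 (by omega))

theorem rid_lt_boundary (keys : List Int) (a b : Nat) (hab : a < b)
    (hb : keys.getD b 0 ≠ keys.getD (b-1) 0) : rid keys a < rid keys b := by
  cases b with
  | zero => omega
  | succ m =>
    have h1 : rid keys a ≤ rid keys m := rid_mono keys a m (by omega)
    have : keys.getD (m+1) 0 ≠ keys.getD m 0 := by simpa using hb
    simp only [rid, if_neg this]
    omega

-- inner `while`-style run-end scan used only by the proofs (maximal run of equal keys)
def altRunEndF (keys : List Int) (n : Nat) : Nat → Nat → Nat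
  | 0, j => j
  | fuel+1, j =>
    if j < n ∧ keys.getD j 0 = keys.getD (j-1) 0 then altRunEndF keys n fuel (j+1) else j

def altRunEnd (keys : List Int) (n j : Nat) : Nat := altRunEndF keys n (n - j) j

theorem altRunEnd_eq (keys : List Int) (n j : Nat) :
    altRunEnd keys n j =
      if _ : j < n ∧ keys.getD j 0 = keys.getD (j-1) 0 then altRunEnd keys n (j+1) else j := by
  unfold altRunEnd
  by_cases hc : j < n ∧ keys.getD j 0 = keys.getD (j-1) 0
  · rw [dif_pos hc]
    have hnj : n - j = (n - (j+1)) + 1 := by omega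
    rw [hnj, altRunEndF, if_pos hc]
  · rw [dif_neg hc]
    cases hnj : n - j with
    | zero => rfl
    | succ f => rw [altRunEndF, if_neg hc]

theorem le_altRunEnd (keys : List Int) (n j : Nat) : j ≤ altRunEnd keys n j := by
  unfold altRunEnd
  have : ∀ fuel j, j ≤ altRunEndF keys n fuel j := by
    intro fuel
    induction fuel with
    | zero => intro j; exact Nat.le_refl j
    | succ fuel ih =>
      intro j
      rw [altRunEndF]
      by_cases hc : j < n ∧ keys.getD j 0 = keys.getD (j-1) 0
      · rw [if_pos hc]; have := ih (j+1); omega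
      · rw [if_neg hc]
  exact this _ j

theorem altRunEnd_le (keys : List Int) (n j : Nat) (h : j ≤ n) : altRunEnd keys n j ≤ n := by
  have : ∀ fuel j, j ≤ n → altRunEndF keys n fuel j ≤ n := by
    intro fuel
    induction fuel with
    | zero => intro j hj; exact hj
    | succ fuel ih =>
      intro j hj
      rw [altRunEndF]
      by_cases hc : j < n ∧ keys.getD j 0 = keys.getD (j-1) 0
      · rw [if_pos hc]; exact ih (j+1) (by omega)
      · rw [if_neg hc]; exact hj
  exact this _ j h

theorem altRunEnd_const (keys : List Int) (n j : Nat) :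
    ∀ t, j ≤ t → t < altRunEnd keys n j → keys.getD t 0 = keys.getD (t-1) 0 := by
  unfold altRunEnd
  suffices h : ∀ fuel j t, j ≤ t → t < altRunEndF keys n fuel j →
      keys.getD t 0 = keys.getD (t-1) 0 by
    intro t; exact h (n - j) j t
  intro fuel
  induction fuel with
  | zero => intro j t h1 h2; simp only [altRunEndF] at h2; omega
  | succ fuel ih =>
    intro j t h1 h2
    rw [altRunEndF] at h2
    by_cases hc : j < n ∧ keys.getD j 0 = keys.getD (j-1) 0
    · rw [if_pos hc] at h2
      rcases Nat.eq_or_lt_of_le h1 with rfl | h'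
      · exact hc.2
      · exact ih (j+1) t h' h2
    · rw [if_neg hc] at h2; omega

theorem altRunEnd_stop (keys : List Int) (n : Nat) :
    ∀ fuel j, n - j ≤ fuel → altRunEnd keys n j < n →
    keys.getD (altRunEnd keys n j) 0 ≠ keys.getD (altRunEnd keys n j - 1) 0 := by
  intro fuel
  induction fuel with
  | zero =>
    intro j hf hlt
    rw [altRunEnd_eq] at hlt ⊢
    have : ¬ (j < n ∧ keys.getD j 0 = keys.getD (j-1) 0) := by
      intro ⟨h1, _⟩; omega
    rw [dif_neg this] at hlt ⊢
    intro heq; exact this ⟨hlt, heq⟩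
  | succ fuel ih =>
    intro j hf hlt
    by_cases hc : j < n ∧ keys.getD j 0 = keys.getD (j-1) 0
    · rw [altRunEnd_eq, dif_pos hc] at hlt ⊢
      exact ih (j+1) (by omega) hlt
    · rw [altRunEnd_eq, dif_neg hc] at hlt ⊢
      intro heq; exact hc ⟨hlt, heq⟩

theorem pvNorm_eq_self (l : List Bool) (h : ¬ (true ∈ l ∧ false ∈ l)) : pvNorm l = l := by
  unfold pvNorm
  split
  next ht =>
    have hf : false ∉ l := fun hf => h ⟨ht, hf⟩
    clear h ht
    induction l with
    | nil => rfl
    | cons b t ih =>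
      cases b
      · exact absurd (List.mem_cons_self) hf
      · simp only [List.length_cons, List.replicate_succ, List.cons.injEq, true_and]
        exact ih (fun hm => hf (List.mem_cons_of_mem _ hm))
  next => rfl

theorem take_drop_cons (vals : List Bool) (i j : Nat) (hi : i < vals.length) (hij : i < j) :
    (vals.drop i).take (j - i) = vals.getD i false :: (vals.drop (i+1)).take (j - (i+1)) := by
  rw [List.drop_eq_getElem_cons hi, List.getD_eq_getElem vals false hi]
  have : j - i = (j - (i+1)) + 1 := by omega
  rw [this, List.take_succ_cons]

-- the remainder of A's loop from index i with current chunk `sub`, already flattened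
def G (vals : List Bool) (keys : List Int) (n i : Nat) (sub : List Bool) : List Bool :=
  if i < n then
    (if keys.getD i 0 = keys.getD (i-1) 0 then G vals keys n (i+1) (sub ++ [vals.getD i false])
     else pvNorm sub ++ G vals keys n (i+1) [vals.getD i false])
  else sub
termination_by n - i

-- A's result in run form (the final run left raw, as A leaves it)
def K (vals : List Bool) (keys : List Int) (n i : Nat) : List Bool :=
  if i < n then
    (if altRunEnd keys n (i+1) = n then (vals.drop i).take (altRunEnd keys n (i+1) - i)
     else pvNorm ((vals.drop i).take (altRunEnd keys n (i+1) - i))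
          ++ K vals keys n (altRunEnd keys n (i+1)))
  else []
termination_by n - i
decreasing_by have := le_altRunEnd keys n (i+1); omega

-- the fully normalised run form (every run, including the last, gets pvNorm)
def KN (vals : List Bool) (keys : List Int) (n i : Nat) : List Bool :=
  if i < n then
    pvNorm ((vals.drop i).take (altRunEnd keys n (i+1) - i))
      ++ KN vals keys n (altRunEnd keys n (i+1))
  else []
termination_by n - i
decreasing_by have := le_altRunEnd keys n (i+1); omega

theorem foldG (vals : List Bool) (keys : List Int) :
    ∀ k i sub acc, k = vals.length - i → 1 ≤ i → i ≤ vals.length →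
    (((List.range' i k).foldl (stepA vals keys) (sub, acc)).2
      ++ [((List.range' i k).foldl (stepA vals keys) (sub, acc)).1]).flatten
    = acc.flatten ++ G vals keys vals.length i sub := by
  intro k
  induction k with
  | zero =>
    intro i sub acc hk h1 h2
    have hi : i = vals.length := by omega
    rw [G]
    simp [hi]
  | succ k ih =>
    intro i sub acc hk h1 h2
    have hi : i < vals.length := by omega
    have h0 : i ≠ 0 := by omega
    rw [List.range'_succ, List.foldl_cons, G]
    by_cases hkey : keys.getD i 0 = keys.getD (i-1) 0
    · have hstep : stepA vals keys (sub, acc) i = (sub ++ [vals.getD i false], acc) := by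
        rw [stepA, if_neg h0, if_pos hkey]
      rw [hstep, ih (i+1) _ _ (by omega) (by omega) (by omega), if_pos hi, if_pos hkey]
    · have hstep : stepA vals keys (sub, acc) i
          = ([vals.getD i false], acc ++ [pvNorm sub]) := by
        rw [stepA, if_neg h0, if_neg hkey]; rfl
      rw [hstep, ih (i+1) _ _ (by omega) (by omega) (by omega), if_pos hi, if_neg hkey]
      simp

theorem G_eq_K (vals : List Bool) (keys : List Int) :
    ∀ k i sub, k = vals.length - i → 1 ≤ i → i ≤ vals.length →
    G vals keys vals.length i sub =
      (if altRunEnd keys vals.length i = vals.length then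
         sub ++ (vals.drop i).take (altRunEnd keys vals.length i - i)
       else pvNorm (sub ++ (vals.drop i).take (altRunEnd keys vals.length i - i))
            ++ K vals keys vals.length (altRunEnd keys vals.length i)) := by
  intro k
  induction k with
  | zero =>
    intro i sub hk h1 h2
    have hi : i = vals.length := by omega
    subst hi
    have hre : altRunEnd keys vals.length vals.length = vals.length := by
      rw [altRunEnd_eq, dif_neg (fun h : vals.length < vals.length ∧ _ => lt_irrefl _ h.1)]
    rw [G, if_neg (lt_irrefl vals.length), hre, if_pos rfl]
    simp
  | succ k ih =>
    intro i sub hk h1 h2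
    have hi : i < vals.length := by omega
    rw [G, if_pos hi]
    by_cases hkey : keys.getD i 0 = keys.getD (i-1) 0
    · have hre : altRunEnd keys vals.length i = altRunEnd keys vals.length (i+1) := by
        rw [altRunEnd_eq, dif_pos ⟨hi, hkey⟩]
      have hj1 : i + 1 ≤ altRunEnd keys vals.length (i+1) := le_altRunEnd _ _ _
      rw [if_pos hkey, ih (i+1) _ (by omega) (by omega) (by omega), hre,
          take_drop_cons vals i _ hi (by omega)]
      simp
    · have hre : altRunEnd keys vals.length i = i := by
        rw [altRunEnd_eq, dif_neg (fun h : _ ∧ _ => hkey h.2)]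
      have hne : i ≠ vals.length := by omega
      have hj1 : i + 1 ≤ altRunEnd keys vals.length (i+1) := le_altRunEnd _ _ _
      have hKi : K vals keys vals.length i =
          (if altRunEnd keys vals.length (i+1) = vals.length then
             [vals.getD i false] ++ (vals.drop (i+1)).take (altRunEnd keys vals.length (i+1) - (i+1))
           else pvNorm ([vals.getD i false] ++ (vals.drop (i+1)).take (altRunEnd keys vals.length (i+1) - (i+1)))
                ++ K vals keys vals.length (altRunEnd keys vals.length (i+1))) := by
        rw [K, if_pos hi, take_drop_cons vals i _ hi (by omega)]
        rfl
      rw [if_neg hkey, ih (i+1) _ (by omega) (by omega) (by omega), ← hKi, hre, if_neg hne]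
      simp

-- outside D_ (hlast), A's run form K equals the fully normalised KN
theorem K_eq_KN (vals : List Bool) (keys : List Int)
    (hlast : ∀ m, m < vals.length →
      (∀ t, t < vals.length → m < t → keys.getD t 0 = keys.getD (t-1) 0) →
      pvNorm (vals.drop m) = vals.drop m) :
    ∀ k i, vals.length - i ≤ k →
    K vals keys vals.length i = KN vals keys vals.length i := by
  intro k
  induction k with
  | zero =>
    intro i hk
    have hi : ¬ i < vals.length := by omega
    rw [K, if_neg hi, KN, if_neg hi]
  | succ k ih =>
    intro i hk
    by_cases hi : i < vals.length
    · rw [K, if_pos hi, KN, if_pos hi]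
      have hj1 : i + 1 ≤ altRunEnd keys vals.length (i+1) := le_altRunEnd _ _ _
      have hj2 : altRunEnd keys vals.length (i+1) ≤ vals.length :=
        altRunEnd_le _ _ _ (by omega)
      set j := altRunEnd keys vals.length (i+1) with hjdef
      by_cases hjn : j = vals.length
      · have hrun : (vals.drop i).take (j - i) = vals.drop i := by
          rw [List.take_of_length_le]; rw [List.length_drop]; omega
        have hconst : ∀ t, t < vals.length → i < t →
            keys.getD t 0 = keys.getD (t-1) 0 := by
          intro t ht1 ht2
          exact altRunEnd_const keys vals.length (i+1) t (by omega) (by omega)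
        have hKNnil : KN vals keys vals.length j = [] := by
          rw [KN, if_neg (by omega)]
        rw [if_pos hjn, hKNnil, List.append_nil, hrun, hlast i hi hconst]
      · rw [if_neg hjn, ih j (by omega)]
    · rw [K, if_neg hi, KN, if_neg hi]

theorem pvNorm_ne_self (l : List Bool) (ht : true ∈ l) (hf : false ∈ l) : pvNorm l ≠ l := by
  rw [pvNorm, if_pos ht]
  intro h
  rw [← h] at hf
  exact absurd (List.eq_of_mem_replicate hf) (by decide)

theorem mem_drop_of_le {x : Bool} (vals : List Bool) (i i0 : Nat) (hle : i ≤ i0)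
    (hm : x ∈ vals.drop i0) : x ∈ vals.drop i := by
  have hd : vals.drop i0 = (vals.drop i).drop (i0 - i) := by
    rw [List.drop_drop]
    congr 1
    omega
  rw [hd] at hm
  exact List.mem_of_mem_drop hm

-- inside D_, A's run form (last run raw) and the normalised form differ at the last run
theorem K_ne_KN (vals : List Bool) (keys : List Int) (i0 : Nat) (hi0 : i0 < vals.length)
    (hconst : ∀ t, t < vals.length → i0 < t → keys.getD t 0 = keys.getD (t-1) 0)
    (hmt : true ∈ vals.drop i0) (hmf : false ∈ vals.drop i0) :
    ∀ k i, vals.length - i ≤ k → i ≤ i0 → i < vals.length →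
    K vals keys vals.length i ≠ KN vals keys vals.length i := by
  intro k
  induction k with
  | zero => intro i hk _ hi; omega
  | succ k ih =>
    intro i hk hii0 hi
    have hj1 : i + 1 ≤ altRunEnd keys vals.length (i+1) := le_altRunEnd _ _ _
    have hj2 : altRunEnd keys vals.length (i+1) ≤ vals.length := altRunEnd_le _ _ _ (by omega)
    set j := altRunEnd keys vals.length (i+1) with hjdef
    by_cases hjn : j = vals.length
    · have hrun : (vals.drop i).take (j - i) = vals.drop i := by
        rw [List.take_of_length_le]; rw [List.length_drop]; omega
      have hKNnil : KN vals keys vals.length j = [] := by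
        rw [KN, if_neg (by omega)]
      rw [K, if_pos hi, if_pos hjn, KN, if_pos hi, ← hjdef, hKNnil, List.append_nil, hrun]
      exact (pvNorm_ne_self (vals.drop i) (mem_drop_of_le vals i i0 hii0 hmt)
        (mem_drop_of_le vals i i0 hii0 hmf)).symm
    · have hjlt : j < vals.length := by omega
      have hb : keys.getD j 0 ≠ keys.getD (j-1) 0 :=
        altRunEnd_stop keys vals.length (vals.length - (i+1)) (i+1) (Nat.le_refl _) hjlt
      have hji0 : j ≤ i0 := by
        by_contra hcon
        exact hb (hconst j hjlt (by omega))
      rw [K, if_pos hi, if_neg hjn, KN, if_pos hi, ← hjdef]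
      intro h
      exact ih j (by omega) hji0 hjlt (List.append_cancel_left h)

-- B's per-element function, rewritten through rid
def fB (vals : List Bool) (keys : List Int) (n k : Nat) : Bool :=
  if (List.range n).any (fun m => vals.getD m false && (rid keys m == rid keys k))
  then true else vals.getD k false

theorem alt_eq_map_fB (vals : List Bool) (keys : List Int) :
    load_valid_index_py_alt vals keys true
      = (List.range vals.length).map (fB vals keys vals.length) := by
  rw [load_valid_index_py_alt, if_pos rfl]
  apply List.map_congr_left
  intro i hi
  have hi' : i < vals.length := List.mem_range.mp hi
  have hgd : ∀ m, m < vals.length →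
      ((altRunIds keys vals.length).2).getD m 0 = rid keys m := by
    intro m hm
    rw [rid_fold]
    exact PySem.List.getD_map_range (rid keys) _ m 0 hm
  have hmem : (((altRunIds keys vals.length).2).getD i 0 ∈
      altTruthy vals ((altRunIds keys vals.length).2) vals.length)
      ↔ ((List.range vals.length).any
          (fun m => vals.getD m false && (rid keys m == rid keys i)) = true) := by
    rw [altTruthy, PySem.Set.mem_ofList, hgd i hi']
    simp only [List.mem_map, List.mem_filter, List.mem_range, List.any_eq_true,
      Bool.and_eq_true, beq_iff_eq]
    constructor
    · rintro ⟨m, ⟨hm, hv⟩, he⟩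
      exact ⟨m, hm, hv, by rw [← hgd m hm, he]⟩
    · rintro ⟨m, hm, hv, he⟩
      exact ⟨m, ⟨hm, hv⟩, by rw [hgd m hm, he]⟩
  rw [fB]
  by_cases h : (List.range vals.length).any
      (fun m => vals.getD m false && (rid keys m == rid keys i)) = true
  · rw [if_pos h, if_pos (hmem.mpr h)]
  · rw [if_neg h, if_neg (fun hc => h (hmem.mp hc))]

theorem map_getD_range' (vals : List Bool) :
    ∀ m i, i + m ≤ vals.length →
    (List.range' i m).map (fun k => vals.getD k false) = (vals.drop i).take m := by
  intro m
  induction m with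
  | zero => intro i _; simp
  | succ m ih =>
    intro i h
    have h0 := take_drop_cons vals i (i + m + 1) (by omega) (by omega)
    rw [show i + m + 1 - i = m + 1 from by omega,
        show i + m + 1 - (i + 1) = m from by omega] at h0
    rw [List.range'_succ, List.map_cons, h0, ih (i+1) (by omega)]

-- a run start: position 0 or a key boundary
def runStart (keys : List Int) (i : Nat) : Prop :=
  i = 0 ∨ keys.getD i 0 ≠ keys.getD (i-1) 0

-- positions sharing a run id with a run start i are exactly the run [i, altRunEnd (i+1))
theorem rid_run_char (keys : List Int) (n i : Nat) (hrs : runStart keys i) (hi : i < n)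
    (hn : altRunEnd keys n (i+1) ≤ n) (m : Nat) (hm : m < n) :
    rid keys m = rid keys i ↔ (i ≤ m ∧ m < altRunEnd keys n (i+1)) := by
  set j := altRunEnd keys n (i+1) with hjdef
  have hj1 : i + 1 ≤ j := le_altRunEnd _ _ _
  have hrun : ∀ k, i ≤ k → k < j → rid keys k = rid keys i := by
    intro k hk1 hk2
    apply rid_const_of_run keys i k hk1
    intro t ht1 ht2
    exact altRunEnd_const keys n (i+1) t (by omega) (by omega)
  constructor
  · intro he
    by_contra hcon
    rcases Nat.lt_or_ge m i with hlt | hge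
    · -- m before the run: i is a boundary (i ≠ 0), so rid m < rid i
      rcases hrs with rfl | hb
      · omega
      · have := rid_lt_boundary keys m i hlt hb
        omega
    · have hmge : j ≤ m := by omega
      have hjlt : j < n := by omega
      have hb : keys.getD j 0 ≠ keys.getD (j-1) 0 :=
        altRunEnd_stop keys n (n - (i+1)) (i+1) (Nat.le_refl _) hjlt
      have h1 : rid keys (j-1) = rid keys i := hrun (j-1) (by omega) (by omega)
      have h2 : rid keys (j-1) < rid keys j := rid_lt_boundary keys (j-1) j (by omega) hb
      have h3 : rid keys j ≤ rid keys m := rid_mono keys j m hmge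
      omega
  · intro ⟨h1, h2⟩
    exact hrun m h1 h2

-- main new lemma: B's per-element map computes the fully normalised run form
theorem map_fB_eq_KN (vals : List Bool) (keys : List Int) :
    ∀ k i, vals.length - i ≤ k → i ≤ vals.length → runStart keys i →
    (List.range' i (vals.length - i)).map (fB vals keys vals.length)
      = KN vals keys vals.length i := by
  intro k
  induction k with
  | zero =>
    intro i hk hle hrs
    have hi : i = vals.length := by omega
    rw [KN, if_neg (by omega)]
    simp [hi]
  | succ k ih =>
    intro i hk hle hrs
    rcases Nat.eq_or_lt_of_le hle with heq | hi
    · rw [KN, if_neg (by omega)]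
      simp [heq]
    · set n := vals.length with hndef
      have hj1 : i + 1 ≤ altRunEnd keys n (i+1) := le_altRunEnd _ _ _
      have hj2 : altRunEnd keys n (i+1) ≤ n := altRunEnd_le _ _ _ (by omega)
      set j := altRunEnd keys n (i+1) with hjdef
      -- split the index range at the run end j
      have hsplit : List.range' i (n - i) = List.range' i (j - i) ++ List.range' j (n - j) := by
        have h := (List.range'_append (s := i) (m := j - i) (n := n - j) (step := 1)).symm
        rw [show i + 1 * (j - i) = j from by omega,
            show (j - i) + (n - j) = n - i from by omega] at h
        exact h
      -- every element of the run has rid = rid i, so fB is constant on the run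
      have hchar : ∀ m, m < n → (rid keys m = rid keys i ↔ (i ≤ m ∧ m < j)) :=
        rid_run_char keys n i hrs hi hj2
      have hridrun : ∀ p, i ≤ p → p < j → rid keys p = rid keys i := by
        intro p h1 h2; exact (hchar p (by omega)).mpr ⟨h1, h2⟩
      -- the run-membership test, as a proposition
      have hany : ∀ p, i ≤ p → p < j →
          (((List.range n).any (fun m => vals.getD m false && (rid keys m == rid keys p))) = true
            ↔ ∃ m, i ≤ m ∧ m < j ∧ vals.getD m false = true) := by
        intro p h1 h2
        simp only [List.any_eq_true, List.mem_range, Bool.and_eq_true, beq_iff_eq]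
        constructor
        · rintro ⟨m, hm, hv, he⟩
          have := (hchar m hm).mp (by rw [he, hridrun p h1 h2])
          exact ⟨m, this.1, this.2, hv⟩
        · rintro ⟨m, h3, h4, hv⟩
          exact ⟨m, by omega, hv, by rw [hridrun m h3 h4, hridrun p h1 h2]⟩
      have hslice : (List.range' i (j - i)).map (fun p => vals.getD p false)
          = (vals.drop i).take (j - i) := by
        apply map_getD_range'; omega
      have hlenslice : ((vals.drop i).take (j - i)).length = j - i := by
        simp only [List.length_take, List.length_drop]; omega
      have hmemslice : (true ∈ (vals.drop i).take (j - i))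
          ↔ ∃ m, i ≤ m ∧ m < j ∧ vals.getD m false = true := by
        rw [← hslice]
        simp only [List.mem_map, List.mem_range'_1]
        constructor
        · rintro ⟨p, ⟨hp1, hp2⟩, hv⟩
          exact ⟨p, hp1, by omega, hv⟩
        · rintro ⟨m, h1, h2, hv⟩
          exact ⟨m, ⟨h1, by omega⟩, hv⟩
      -- run part of the map equals pvNorm of the run slice
      have hrunmap : (List.range' i (j - i)).map (fB vals keys n)
          = pvNorm ((vals.drop i).take (j - i)) := by
        by_cases hex : ∃ m, i ≤ m ∧ m < j ∧ vals.getD m false = true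
        · have : ∀ p ∈ List.range' i (j - i), fB vals keys n p = true := by
            intro p hp
            obtain ⟨h1, h2⟩ := List.mem_range'_1.mp hp
            rw [fB, if_pos ((hany p h1 (by omega)).mpr hex)]
          rw [pvNorm, if_pos (hmemslice.mpr hex)]
          rw [hlenslice]
          calc (List.range' i (j - i)).map (fB vals keys n)
              = (List.range' i (j - i)).map (fun _ => true) := List.map_congr_left this
            _ = List.replicate (j - i) true := by
                rw [List.map_const']; simp
        · have : ∀ p ∈ List.range' i (j - i), fB vals keys n p = vals.getD p false := by
            intro p hp
            obtain ⟨h1, h2⟩ := List.mem_range'_1.mp hp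
            rw [fB, if_neg (fun hc => hex ((hany p h1 (by omega)).mp hc))]
          rw [pvNorm, if_neg (fun hc => hex (hmemslice.mp hc))]
          rw [List.map_congr_left this, hslice]
      -- recurse on the rest
      have hrest : (List.range' j (n - j)).map (fB vals keys n)
          = KN vals keys n j := by
        by_cases hjn : j < n
        · have hrsj : runStart keys j :=
            Or.inr (altRunEnd_stop keys n (n - (i+1)) (i+1) (Nat.le_refl _) hjn)
          exact ih j (by omega) (by omega) hrsj
        · rw [KN, if_neg hjn]
          have : n - j = 0 := by omega
          simp [this]
      rw [hsplit, List.map_append, hrunmap, hrest]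
      conv_rhs => rw [KN]
      rw [if_pos hi]

-- ===== VERDICT (by name: the statement is the Claim_ definition above) =====
theorem load_valid_index_py_spec : Claim_unchanged_load_valid_index_py := by
  intro vals keys flag hdom hpre hnd
  cases flag with
  | false => simp [load_valid_index_py, load_valid_index_py_alt]
  | true =>
    show load_valid_index_py vals keys true = load_valid_index_py_alt vals keys true
    have hlast : ∀ m, m < vals.length →
        (∀ t, t < vals.length → m < t → keys.getD t 0 = keys.getD (t-1) 0) →
        pvNorm (vals.drop m) = vals.drop m := by
      intro m hm hconst
      apply pvNorm_eq_self
      intro ⟨ht, hf⟩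
      exact hnd ⟨rfl, m, hm, hconst, ht, hf⟩
    rcases Nat.eq_zero_or_pos vals.length with h0 | h0
    · have : vals = [] := List.eq_nil_of_length_eq_zero h0
      subst this
      rw [load_valid_index_py, load_valid_index_py_alt]
      simp
    · -- B's side: map over run starts = KN from 0
      have hB : load_valid_index_py_alt vals keys true = KN vals keys vals.length 0 := by
        rw [alt_eq_map_fB, List.range_eq_range']
        have : vals.length = vals.length - 0 := by omega
        rw [this]
        exact map_fB_eq_KN vals keys vals.length 0 (by omega) (by omega) (Or.inl rfl)
      -- A's side: fold = G 1 [v0] = run form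
      have hrange : List.range vals.length = 0 :: List.range' 1 (vals.length - 1) := by
        rw [List.range_eq_range']
        have h : vals.length = (vals.length - 1) + 1 := by omega
        conv_lhs => rw [h]
        rw [List.range'_succ]
      have hstep0 : stepA vals keys ([], []) 0 = ([vals.getD 0 false], []) := by
        rw [stepA, if_pos rfl]; rfl
      have hA : load_valid_index_py vals keys true
          = G vals keys vals.length 1 [vals.getD 0 false] := by
        rw [load_valid_index_py, if_pos rfl]
        show ((((List.range vals.length).foldl (stepA vals keys) ([], [])).2)
          ++ [(((List.range vals.length).foldl (stepA vals keys) ([], [])).1)]).flatten = _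
        rw [hrange, List.foldl_cons, hstep0,
            foldG vals keys (vals.length - 1) 1 _ _ (by omega) (by omega) (by omega)]
        simp
      have hj1 : 1 ≤ altRunEnd keys vals.length 1 := le_altRunEnd _ _ _
      have hj2 : altRunEnd keys vals.length 1 ≤ vals.length := altRunEnd_le _ _ _ (by omega)
      set j := altRunEnd keys vals.length 1 with hjdef
      have hrun : [vals.getD 0 false] ++ (vals.drop 1).take (j - 1)
          = (vals.drop 0).take (j - 0) := by
        rw [take_drop_cons vals 0 j h0 (by omega)]; rfl
      -- KN from 0 unfolds to the first run followed by KN from j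
      have hKN0 : KN vals keys vals.length 0
          = pvNorm ((vals.drop 0).take (j - 0)) ++ KN vals keys vals.length j := by
        rw [KN, if_pos h0]
      rw [hA, G_eq_K vals keys (vals.length - 1) 1 _ (by omega) (by omega) (by omega),
          ← hjdef, hrun, hB, hKN0]
      by_cases hjn : j = vals.length
      · have hconst : ∀ t, t < vals.length → 0 < t →
            keys.getD t 0 = keys.getD (t-1) 0 := by
          intro t ht1 ht2
          exact altRunEnd_const keys vals.length 1 t (by omega) (by omega)
        have htake : (vals.drop 0).take (j - 0) = vals.drop 0 := by
          rw [List.take_of_length_le]; rw [List.length_drop]; omega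
        have hKNnil : KN vals keys vals.length j = [] := by
          rw [KN, if_neg (by omega)]
        rw [if_pos hjn, hKNnil, List.append_nil, htake, hlast 0 h0 hconst]
      · rw [if_neg hjn, K_eq_KN vals keys hlast vals.length j (by omega)]

theorem load_valid_index_py_changed : Claim_changed_load_valid_index_py := by
  unfold Claim_changed_load_valid_index_py
  refine ⟨by decide, by decide, by decide, by decide, by decide, by decide⟩

theorem load_valid_index_py_tight : Claim_exact_load_valid_index_py := by
  intro vals keys flag hdom hpre hd
  obtain ⟨hf, i0, hi0, hconst, hmt, hmf⟩ := hd
  subst hf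
  have h0 : 0 < vals.length := by omega
  have hrange : List.range vals.length = 0 :: List.range' 1 (vals.length - 1) := by
    rw [List.range_eq_range']
    have h : vals.length = (vals.length - 1) + 1 := by omega
    conv_lhs => rw [h]
    rw [List.range'_succ]
  have hstep0 : stepA vals keys ([], []) 0 = ([vals.getD 0 false], []) := by
    rw [stepA, if_pos rfl]; rfl
  have hA : load_valid_index_py vals keys true
      = G vals keys vals.length 1 [vals.getD 0 false] := by
    rw [load_valid_index_py, if_pos rfl]
    show ((((List.range vals.length).foldl (stepA vals keys) ([], [])).2)
      ++ [(((List.range vals.length).foldl (stepA vals keys) ([], [])).1)]).flatten = _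
    rw [hrange, List.foldl_cons, hstep0,
        foldG vals keys (vals.length - 1) 1 _ _ (by omega) (by omega) (by omega)]
    simp
  have hB : load_valid_index_py_alt vals keys true = KN vals keys vals.length 0 := by
    rw [alt_eq_map_fB, List.range_eq_range']
    have h : vals.length = vals.length - 0 := by omega
    rw [h]
    exact map_fB_eq_KN vals keys vals.length 0 (by omega) (by omega) (Or.inl rfl)
  have hj1 : 1 ≤ altRunEnd keys vals.length 1 := le_altRunEnd _ _ _
  have hj2 : altRunEnd keys vals.length 1 ≤ vals.length := altRunEnd_le _ _ _ (by omega)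
  set j := altRunEnd keys vals.length 1 with hjdef
  have hrun : [vals.getD 0 false] ++ (vals.drop 1).take (j - 1)
      = (vals.drop 0).take (j - 0) := by
    rw [take_drop_cons vals 0 j h0 (by omega)]; rfl
  have hKN0 : KN vals keys vals.length 0
      = pvNorm ((vals.drop 0).take (j - 0)) ++ KN vals keys vals.length j := by
    rw [KN, if_pos h0]
  rw [hA, G_eq_K vals keys (vals.length - 1) 1 _ (by omega) (by omega) (by omega),
      ← hjdef, hrun, hB, hKN0]
  by_cases hjn : j = vals.length
  · have htake : (vals.drop 0).take (j - 0) = vals.drop 0 := by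
      rw [List.take_of_length_le]; rw [List.length_drop]; omega
    have hKNnil : KN vals keys vals.length j = [] := by
      rw [KN, if_neg (by omega)]
    rw [if_pos hjn, hKNnil, List.append_nil, htake]
    exact (pvNorm_ne_self (vals.drop 0) (mem_drop_of_le vals 0 i0 (by omega) hmt)
      (mem_drop_of_le vals 0 i0 (by omega) hmf)).symm
  · have hjlt : j < vals.length := by omega
    have hb : keys.getD j 0 ≠ keys.getD (j-1) 0 :=
      altRunEnd_stop keys vals.length (vals.length - 1) 1 (by omega) hjlt
    have hji0 : j ≤ i0 := by
      by_contra hcon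
      exact hb (hconst j hjlt (by omega))
    rw [if_neg hjn]
    intro h
    exact K_ne_KN vals keys i0 hi0 hconst hmt hmf vals.length j (by omega) hji0 hjlt
      (List.append_cancel_left h)
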